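-- pv_equiv track=rewrite | github.com/jostmey/msm | cervical-cancer/dataset.py | split_samples
-- ===== SOURCE A (Python) =====
-- def split_samples(samples, holdouts):
--   samples_train = []
--   samples_val = []
--   for sample in samples:
--     if sample['subject'] not in holdouts:
--       samples_train.append(sample)
--     else:
--       samples_val.append(sample)
--   return samples_train, samples_val
-- ===== SOURCE B (Python) =====
-- def split_samples(samples, holdouts):
--   samples_train = [sample for sample in samples if sample['subject'] not in holdouts]
--   samples_val = [sample for sample in samples if sample['subject'] in holdouts]
--   return samples_train, samples_val
-- ===== Notes on version B (the rewrite author's own statement) =====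
-- stated objective: idiomatic
-- what changed: Replaced the single accumulator loop with a branch by two independent filtering comprehensions over samples (one for 'not in holdouts', one for 'in').
import Mathlib
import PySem

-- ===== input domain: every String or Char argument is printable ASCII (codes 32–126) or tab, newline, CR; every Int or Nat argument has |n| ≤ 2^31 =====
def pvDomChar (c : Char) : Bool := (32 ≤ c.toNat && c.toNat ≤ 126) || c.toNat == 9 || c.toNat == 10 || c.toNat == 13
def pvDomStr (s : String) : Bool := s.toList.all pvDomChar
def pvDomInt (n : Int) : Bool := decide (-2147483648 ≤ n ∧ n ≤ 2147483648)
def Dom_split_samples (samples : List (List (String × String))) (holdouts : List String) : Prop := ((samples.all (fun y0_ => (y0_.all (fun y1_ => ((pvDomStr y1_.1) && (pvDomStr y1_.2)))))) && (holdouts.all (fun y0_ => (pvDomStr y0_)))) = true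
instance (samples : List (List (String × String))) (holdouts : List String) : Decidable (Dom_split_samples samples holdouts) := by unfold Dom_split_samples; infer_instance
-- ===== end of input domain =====

-- B replaces A's single branching accumulator loop by two independent filtering comprehensions; same results.
-- ===== PORT A =====
-- sample['subject'] in holdouts  (KeyError, i.e. none on get?, is excluded by Pre_; helper returns false there)
def subjInHoldA (sample : List (String × String)) (holdouts : List String) : Bool :=
  match (PySem.Dict.mk sample).get? "subject" with
  | some s => holdouts.contains s
  | none => false

def split_samples (samples : List (List (String × String))) (holdouts : List String) : (List (List (String × String))) × (List (List (String × String))) :=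
  samples.foldl (fun (acc : List (List (String × String)) × List (List (String × String))) sample =>
    if !(subjInHoldA sample holdouts) then (acc.1 ++ [sample], acc.2)
    else (acc.1, acc.2 ++ [sample])) ([], [])

-- ===== PORT B =====  (the membership test `sample['subject'] in holdouts` is the same expression; helper shared)
def split_samples_alt (samples : List (List (String × String))) (holdouts : List String) : (List (List (String × String))) × (List (List (String × String))) :=
  (samples.filter (fun sample => !(subjInHoldA sample holdouts)),
   samples.filter (fun sample => subjInHoldA sample holdouts))

-- ===== PRECONDITION & SPEC =====
-- Pre_ excludes samples missing the 'subject' key, where Python A raises KeyError.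
def Pre_split_samples (samples : List (List (String × String))) (holdouts : List String) : Prop :=
  ∀ sample ∈ samples, ((PySem.Dict.mk sample).get? "subject").isSome = true
instance (samples : List (List (String × String))) (holdouts : List String) : Decidable (Pre_split_samples samples holdouts) := by unfold Pre_split_samples; infer_instance
def pvWitness_split_samples : (List (List (String × String))) × List String := ([[("subject", "a")], [("subject", "b")]], ["b"])

def Spec_split_samples (samples : List (List (String × String))) (holdouts : List String) (out : (List (List (String × String))) × (List (List (String × String)))) : Prop := out = split_samples_alt samples holdouts
instance (samples : List (List (String × String))) (holdouts : List String) (out : (List (List (String × String))) × (List (List (String × String)))) : Decidable (Spec_split_samples samples holdouts out) := by unfold Spec_split_samples; infer_instance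

-- ===== CLAIM (what is proved, stated in full; the proofs are below) =====
def Claim_equal_split_samples : Prop := ∀ (samples : List (List (String × String))) (holdouts : List String), Dom_split_samples samples holdouts → Pre_split_samples samples holdouts → Spec_split_samples samples holdouts (split_samples samples holdouts)

-- ===== LEMMAS AND PROOFS =====

-- ===== VERDICT (by name: the statement is the Claim_ definition above) =====
theorem split_samples_foldl (samples : List (List (String × String))) (holdouts : List String)
    (t v : List (List (String × String))) :
    samples.foldl (fun (acc : List (List (String × String)) × List (List (String × String))) sample =>
      if !(subjInHoldA sample holdouts) then (acc.1 ++ [sample], acc.2)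
      else (acc.1, acc.2 ++ [sample])) (t, v) =
    (t ++ samples.filter (fun sample => !(subjInHoldA sample holdouts)),
     v ++ samples.filter (fun sample => subjInHoldA sample holdouts)) := by
  induction samples generalizing t v with
  | nil => simp
  | cons x xs ih =>
    rw [List.foldl_cons]
    by_cases h : subjInHoldA x holdouts = true
    · rw [if_neg (by simp [h]), ih]
      simp [h]
    · rw [if_pos (by simp [Bool.not_eq_true] at h ⊢; exact h), ih]
      simp only [Bool.not_eq_true] at h
      simp [h]

theorem split_samples_spec : Claim_equal_split_samples := by
  intro samples holdouts _ _
  unfold Spec_split_samples split_samples split_samples_alt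
  rw [split_samples_foldl]
  simp
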